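-- pv_equiv track=rewrite | github.com/derek-denman/robot-sink | ros_ws/src/robot_console/robot_console/ros_adapters.py | _encode_u8_rle
-- ===== SOURCE A (Python) =====
-- from typing import Any, Callable, Dict, List, Optional, Sequence
--
-- def _encode_u8_rle(values: Sequence[int]) -> List[List[int]]:
--     if not values:
--         return []
--     out: List[List[int]] = []
--     run_val = max(0, min(255, int(values[0])))
--     run_count = 1
--     for raw in values[1:]:
--         value = max(0, min(255, int(raw)))
--         if value == run_val and run_count < 65535:
--             run_count += 1
--             continue
--         out.append([run_val, run_count])
--         run_val = value
--         run_count = 1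
--     out.append([run_val, run_count])
--     return out
-- ===== SOURCE B (Python) =====
-- from typing import List, Sequence
--
-- def _encode_u8_rle(values: Sequence[int]) -> List[List[int]]:
--     clamped = [max(0, min(255, int(x))) for x in values]
--     out: List[List[int]] = []
--     i, n = 0, len(clamped)
--     while i < n:
--         j = i + 1
--         while j < n and clamped[j] == clamped[i]:
--             j += 1
--         q, r = divmod(j - i, 65535)
--         out.extend([clamped[i], 65535] for _ in range(q))
--         if r:
--             out.append([clamped[i], r])
--         i = j
--     return out
-- ===== Notes on version B (the rewrite author's own statement) =====
-- stated objective: alternative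
-- what changed: B clamps once up front, then scans runs with an inner two-pointer loop over the clamped list and converts each full run length to output chunks arithmetically via divmod(L, 65535), instead of A's single stateful loop that caps and resets a running counter element by element.
import Mathlib
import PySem

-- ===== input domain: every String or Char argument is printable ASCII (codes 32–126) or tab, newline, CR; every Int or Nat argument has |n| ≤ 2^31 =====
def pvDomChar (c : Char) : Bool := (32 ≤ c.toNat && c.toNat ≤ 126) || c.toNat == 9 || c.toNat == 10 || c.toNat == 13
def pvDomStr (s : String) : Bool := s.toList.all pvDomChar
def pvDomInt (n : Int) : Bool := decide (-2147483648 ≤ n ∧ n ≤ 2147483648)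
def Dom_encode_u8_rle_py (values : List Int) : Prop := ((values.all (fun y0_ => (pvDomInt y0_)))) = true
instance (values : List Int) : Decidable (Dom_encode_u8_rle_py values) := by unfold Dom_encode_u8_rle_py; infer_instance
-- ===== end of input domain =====

-- B groups clamped values into full runs and splits each run length into 65535-chunks by divmod;
-- A keeps one capped running counter. Same return value on every input; alternative decomposition.

-- ===== PORT A =====
-- A's loop state is (out, run_val, run_count); clamping happens inside the loop, as in A.
def encode_u8_rle_py (values : List Int) : List (List Int) :=
  match values with
  | [] => []
  | v0 :: rest =>
    let st := rest.foldl
      (fun (st : List (List Int) × Int × Int) raw =>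
        let value := max 0 (min 255 raw)
        if value = st.2.1 ∧ st.2.2 < 65535 then
          (st.1, st.2.1, st.2.2 + 1)
        else
          (st.1 ++ [[st.2.1, st.2.2]], value, 1))
      ([], max 0 (min 255 v0), 1)
    st.1 ++ [[st.2.1, st.2.2]]

-- ===== PORT B =====
-- the inner `while j < n and clamped[j] == clamped[i]` two-pointer scan is the takeWhile/dropWhile
-- split of the tail; divmod(L, 65535) is PySem.Int.floordiv/mod (exact: Python's floor divmod).
def bEmit (v L : Int) : List (List Int) :=
  List.replicate (PySem.Int.floordiv L 65535).toNat [v, 65535] ++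
    (if PySem.Int.mod L 65535 ≠ 0 then [[v, PySem.Int.mod L 65535]] else [])

def bRuns : List Int → List (List Int)
  | [] => []
  | x :: xs =>
    bEmit x (1 + (xs.takeWhile (· = x)).length) ++ bRuns (xs.dropWhile (· = x))
termination_by l => l.length
decreasing_by
  simp only [List.length_cons]
  exact Nat.lt_succ_of_le (List.length_dropWhile_le _ _)

def encode_u8_rle_py_alt (values : List Int) : List (List Int) :=
  bRuns (values.map (fun x => max 0 (min 255 x)))

-- ===== PRECONDITION & SPEC =====
def Spec_encode_u8_rle_py (values : List Int) (out : List (List Int)) : Prop := out = encode_u8_rle_py_alt values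
instance (values : List Int) (out : List (List Int)) : Decidable (Spec_encode_u8_rle_py values out) := by unfold Spec_encode_u8_rle_py; infer_instance

-- ===== CLAIM (what is proved, stated in full; the proofs are below) =====
def Claim_equal_encode_u8_rle_py : Prop := ∀ (values : List Int), Dom_encode_u8_rle_py values → Spec_encode_u8_rle_py values (encode_u8_rle_py values)

-- ===== LEMMAS AND PROOFS =====

-- Recursive characterisation of A's loop from state (run_val, run_count); emits everything to come.
def aAux (rv rc : Int) : List Int → List (List Int)
  | [] => [[rv, rc]]
  | raw :: rest =>
    let value := max 0 (min 255 raw)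
    if value = rv ∧ rc < 65535 then aAux rv (rc + 1) rest
    else [rv, rc] :: aAux value 1 rest

theorem foldA_eq_aAux (xs : List Int) (out : List (List Int)) (rv rc : Int) :
    (let st := xs.foldl
      (fun (st : List (List Int) × Int × Int) raw =>
        let value := max 0 (min 255 raw)
        if value = st.2.1 ∧ st.2.2 < 65535 then
          (st.1, st.2.1, st.2.2 + 1)
        else
          (st.1 ++ [[st.2.1, st.2.2]], value, 1))
      (out, rv, rc)
     st.1 ++ [[st.2.1, st.2.2]]) = out ++ aAux rv rc xs := by
  induction xs generalizing out rv rc with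
  | nil => simp [aAux]
  | cons raw rest ih =>
    simp only [List.foldl_cons, aAux]
    by_cases h : max 0 (min 255 raw) = rv ∧ rc < 65535
    · simp only [h]
      exact ih out rv (rc + 1)
    · simp only [if_neg h]
      rw [ih (out ++ [[rv, rc]]) (max 0 (min 255 raw)) 1]
      simp

theorem floordiv_pos_eq (a : Int) : PySem.Int.floordiv a 65535 = a / 65535 :=
  PySem.Int.floordiv_eq_ediv_of_pos (by norm_num)

theorem mod_pos_eq (a : Int) : PySem.Int.mod a 65535 = a % 65535 :=
  PySem.Int.mod_eq_emod_of_pos (by norm_num)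

theorem bEmit_small (v c : Int) (h1 : 1 ≤ c) (h2 : c ≤ 65535) : bEmit v c = [[v, c]] := by
  unfold bEmit
  rw [floordiv_pos_eq, mod_pos_eq]
  rcases lt_or_eq_of_le h2 with h | h
  · have hd : c / 65535 = 0 := by omega
    have hm : c % 65535 = c := by omega
    have hc0 : c ≠ 0 := by omega
    simp [hd, hm, hc0]
  · subst h
    simp

theorem bEmit_step (v m : Int) (hm : 0 ≤ m) :
    bEmit v (65535 + m) = [v, 65535] :: bEmit v m := by
  unfold bEmit
  rw [floordiv_pos_eq, floordiv_pos_eq, mod_pos_eq, mod_pos_eq]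
  have hd : (65535 + m) / 65535 = m / 65535 + 1 := by omega
  have hm' : (65535 + m) % 65535 = m % 65535 := by omega
  have hnn : 0 ≤ m / 65535 := Int.ediv_nonneg hm (by norm_num)
  rw [hd, hm']
  have : (m / 65535 + 1).toNat = (m / 65535).toNat + 1 := by omega
  rw [this, List.replicate_succ]
  simp

-- Main loop correspondence: A's remaining output from state (x, c) equals B's chunked
-- encoding of the current run extended by the leading x's of the (clamped) tail.
theorem aAux_eq_bRuns (vs : List Int) (x c : Int) (h1 : 1 ≤ c) (h2 : c ≤ 65535) :
    aAux x c vs =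
      bEmit x (c + ((vs.map (fun x => max 0 (min 255 x))).takeWhile (· = x)).length) ++
        bRuns ((vs.map (fun x => max 0 (min 255 x))).dropWhile (· = x)) := by
  induction vs generalizing x c with
  | nil => simp [aAux, bRuns, bEmit_small x c h1 h2]
  | cons raw rest ih =>
    simp only [List.map_cons, aAux]
    by_cases hv : max 0 (min 255 raw) = x
    · simp only [List.takeWhile_cons, List.dropWhile_cons, hv, decide_true, if_true,
        List.length_cons, true_and]
      by_cases hc : c < 65535
      · rw [if_pos hc, ih x (c + 1) (by omega) (by omega)]
        congr 2
        push_cast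
        ring
      · have hceq : c = 65535 := by omega
        rw [if_neg hc, ih x 1 (by omega) (by norm_num), hceq]
        have e : ∀ (n : Nat), (65535 : Int) + ((n + 1 : Nat) : Int) = 65535 + (1 + (n : Int)) := by
          intro n; push_cast; ring
        rw [e, bEmit_step x _ (by positivity)]
        simp
    · rw [if_neg (fun h => hv h.1), ih (max 0 (min 255 raw)) 1 (by omega) (by norm_num),
        List.takeWhile_cons, List.dropWhile_cons]
      simp only [hv, decide_false, Bool.false_eq_true, if_false, List.length_nil,
        Nat.cast_zero, add_zero]
      rw [bEmit_small x c h1 h2]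
      simp only [bRuns]
      simp

-- ===== VERDICT (by name: the statement is the Claim_ definition above) =====
theorem encode_u8_rle_py_spec : Claim_equal_encode_u8_rle_py := by
  intro values _
  unfold Spec_encode_u8_rle_py encode_u8_rle_py encode_u8_rle_py_alt
  match values with
  | [] => simp [bRuns]
  | v0 :: rest =>
    simp only
    rw [foldA_eq_aAux rest [] (max 0 (min 255 v0)) 1]
    rw [aAux_eq_bRuns rest (max 0 (min 255 v0)) 1 (by omega) (by norm_num)]
    simp only [List.map_cons, bRuns, List.nil_append]
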